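-- pv_equiv track=rewrite | github.com/Creepmoon/-1-. | lab0/task3/task3.py | last_digit_fibonacci
-- ===== SOURCE A (Python) =====
-- def last_digit_fibonacci(n):
--     if n <= 1:
--         return n
--     pisano_period = 60
--     n %= pisano_period
--
--     if n <= 1:
--         return n
--     previous, current = 0, 1
--     for _ in range(n - 1):
--         previous, current = current, (previous + current) % 10
--
--     return current
-- ===== SOURCE B (Python) =====
-- def last_digit_fibonacci(n):
--     if n <= 1:
--         return n
--     n %= 60
--     if n <= 1:
--         return n
--
--     def fib_pair(k):
--         # returns (F(k) % 10, F(k+1) % 10) by fast doubling over the bits of k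
--         if k == 0:
--             return (0, 1)
--         a, b = fib_pair(k // 2)
--         c = a * (2 * b - a) % 10
--         d = (a * a + b * b) % 10
--         if k % 2:
--             return (d, (c + d) % 10)
--         return (c, d)
--
--     return fib_pair(n)[0]
-- ===== Notes on version B (the rewrite author's own statement) =====
-- stated objective: alternative
-- what changed: B computes the last digit by fast-doubling Fibonacci modulo ten recursing over the bits of the reduced index (F(2k)=F(k)(2F(k+1)-F(k)), F(2k+1)=F(k)^2+F(k+1)^2, reduced modulo ten), replacing A's linear rolling-pair loop.
import Mathlib
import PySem

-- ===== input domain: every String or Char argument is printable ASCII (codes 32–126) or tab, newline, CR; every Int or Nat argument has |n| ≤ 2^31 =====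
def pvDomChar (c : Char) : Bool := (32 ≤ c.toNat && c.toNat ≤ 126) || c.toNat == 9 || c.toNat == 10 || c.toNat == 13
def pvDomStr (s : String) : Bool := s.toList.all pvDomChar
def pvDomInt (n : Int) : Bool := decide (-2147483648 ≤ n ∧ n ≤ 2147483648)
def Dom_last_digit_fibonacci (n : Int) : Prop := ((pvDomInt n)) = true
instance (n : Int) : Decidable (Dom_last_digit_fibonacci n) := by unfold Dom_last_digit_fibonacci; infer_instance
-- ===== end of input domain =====

-- B replaces A's linear rolling-pair loop by fast-doubling Fibonacci (reduced modulo ten) over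
-- the bits of the reduced index (alternative algorithm; same guards as A).

-- ===== PORT A =====
def last_digit_fibonacci (n : Int) : Int :=
  if n ≤ 1 then n
  else if PySem.Int.mod n 60 ≤ 1 then PySem.Int.mod n 60
  else
    -- for _ in range(n - 1): previous, current = current, (previous + current) % 10
    ((List.range (PySem.Int.mod n 60 - 1).toNat).foldl
      (fun (pc : Int × Int) _ => (pc.2, PySem.Int.mod (pc.1 + pc.2) 10)) (0, 1)).2

-- ===== PORT B =====
-- fib_pair from Source B; the fuel argument only makes the k // 2 recursion total
-- (64 ≥ the bit length of any admitted k), the computation is Source B's step for step.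
def pvFibPair : Nat → Nat → Int × Int
  | 0, _ => (0, 1)
  | fuel + 1, k =>
    if k = 0 then (0, 1)
    else
      let p := pvFibPair fuel (k / 2)
      let c := PySem.Int.mod (p.1 * (2 * p.2 - p.1)) 10
      let d := PySem.Int.mod (p.1 * p.1 + p.2 * p.2) 10
      if k % 2 = 1 then (d, PySem.Int.mod (c + d) 10) else (c, d)

def last_digit_fibonacci_alt (n : Int) : Int :=
  if n ≤ 1 then n
  else
    let m := PySem.Int.mod n 60
    if m ≤ 1 then m
    else (pvFibPair 64 m.toNat).1

-- ===== PRECONDITION & SPEC =====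
def Spec_last_digit_fibonacci (n : Int) (out : Int) : Prop := out = last_digit_fibonacci_alt n
instance (n : Int) (out : Int) : Decidable (Spec_last_digit_fibonacci n out) := by unfold Spec_last_digit_fibonacci; infer_instance

-- ===== CLAIM =====
def Claim_equal_last_digit_fibonacci : Prop := ∀ (n : Int), Dom_last_digit_fibonacci n → Spec_last_digit_fibonacci n (last_digit_fibonacci n)

-- ===== LEMMAS AND PROOFS =====

-- On every residue k < 60, A's rolling-pair loop agrees with B's fast-doubling
-- pair (including the small-k guard both sides share).
theorem pisano_key : ∀ k : Nat, k < 60 →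
    (if (k : Int) ≤ 1 then (k : Int)
     else ((List.range ((k : Int) - 1).toNat).foldl
        (fun (pc : Int × Int) _ => (pc.2, PySem.Int.mod (pc.1 + pc.2) 10)) (0, 1)).2)
    = (if (k : Int) ≤ 1 then (k : Int) else (pvFibPair 64 k).1) := by decide

-- ===== VERDICT =====
theorem last_digit_fibonacci_spec : Claim_equal_last_digit_fibonacci := by
  intro n _
  unfold Spec_last_digit_fibonacci last_digit_fibonacci last_digit_fibonacci_alt
  by_cases h : n ≤ 1
  · simp [h]
  · simp only [if_neg h]
    have h0 : (0 : Int) ≤ PySem.Int.mod n 60 := PySem.Int.mod_nonneg n (by norm_num)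
    have h60 : PySem.Int.mod n 60 < 60 := PySem.Int.mod_lt n (by norm_num)
    have hcast : PySem.Int.mod n 60 = (((PySem.Int.mod n 60).toNat : Nat) : Int) :=
      (Int.toNat_of_nonneg h0).symm
    have key := pisano_key (PySem.Int.mod n 60).toNat (by omega)
    simpa only [← hcast] using key
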